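-- pv_equiv track=rewrite | github.com/awxzed/log-security-analyzer | log_analyzer.py | check_content_anomaly
-- ===== SOURCE A (Python) =====
-- def check_content_anomaly(request_path):
--     attack_signatures = [
--         "union select",
--         "../",
--         "/etc/passwd",
--         "phpmyadmin",
--         "wp-admin",
--         "select * from",
--         ".env",
--         "config.php"
--     ]
--
--     for signature in attack_signatures:
--         if signature in request_path.lower():
--             return True
--     return False
-- ===== SOURCE B (Python) =====
-- def check_content_anomaly(request_path):
--     attack_signatures = (
--         "union select",
--         "../",
--         "/etc/passwd",
--         "phpmyadmin",
--         "wp-admin",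
--         "select * from",
--         ".env",
--         "config.php",
--     )
--     p = request_path.lower()
--     # single left-to-right scan over positions: at each position test whether
--     # some signature starts there, instead of eight independent substring searches
--     for i in range(len(p) + 1):
--         for sig in attack_signatures:
--             if p.startswith(sig, i):
--                 return True
--     return False
-- ===== Notes on version B (the rewrite author's own statement) =====
-- stated objective: alternative
-- what changed: B makes a single left-to-right scan over the positions of the lowered path, testing at each position whether any signature starts there, instead of A's eight independent substring searches over the whole path.
import Mathlib
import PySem

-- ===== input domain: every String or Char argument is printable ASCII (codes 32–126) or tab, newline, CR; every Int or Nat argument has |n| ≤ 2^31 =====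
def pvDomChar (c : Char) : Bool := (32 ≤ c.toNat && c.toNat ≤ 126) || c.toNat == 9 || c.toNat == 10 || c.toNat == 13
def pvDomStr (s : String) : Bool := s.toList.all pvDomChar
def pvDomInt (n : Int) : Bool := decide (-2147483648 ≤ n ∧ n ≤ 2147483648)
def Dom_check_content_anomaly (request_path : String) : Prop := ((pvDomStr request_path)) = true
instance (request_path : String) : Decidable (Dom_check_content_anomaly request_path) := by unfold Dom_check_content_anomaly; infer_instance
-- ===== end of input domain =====

-- B replaces A's per-signature substring searches by one positional scan of the lowered path (alternative decomposition, same cost).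

-- the eight attack signatures (shared data of both programs)
def pvSigs : List String :=
  ["union select", "../", "/etc/passwd", "phpmyadmin", "wp-admin",
   "select * from", ".env", "config.php"]

-- ===== PORT A =====
-- A: for each signature, 'signature in request_path.lower()'
def pvLoopA (low : String) : List String → Bool
  | [] => false
  | sig :: rest => if PySem.Str.isIn sig low then true else pvLoopA low rest

def check_content_anomaly (request_path : String) : Bool :=
  pvLoopA (PySem.Str.lower request_path) pvSigs

-- ===== PORT B =====
-- B: inner loop — does some signature start at position i?  (p.startswith(sig, i))
def pvAtB (low : List Char) (i : Nat) : List String → Bool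
  | [] => false
  | sig :: rest =>
      if PySem.Chars.startswith (low.drop i) sig.toList then true else pvAtB low i rest

-- B: outer loop over positions i in range(len(p)+1)
def pvScanB (low : List Char) : List Nat → Bool
  | [] => false
  | i :: rest => if pvAtB low i pvSigs then true else pvScanB low rest

def check_content_anomaly_alt (request_path : String) : Bool :=
  let low := (PySem.Str.lower request_path).toList
  pvScanB low (List.range (low.length + 1))

-- ===== PRECONDITION & SPEC =====
def Spec_check_content_anomaly (request_path : String) (out : Bool) : Prop := out = check_content_anomaly_alt request_path
instance (request_path : String) (out : Bool) : Decidable (Spec_check_content_anomaly request_path out) := by unfold Spec_check_content_anomaly; infer_instance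

-- ===== CLAIM (what is proved, stated in full; the proofs are below) =====
def Claim_equal_check_content_anomaly : Prop := ∀ (request_path : String), Dom_check_content_anomaly request_path → Spec_check_content_anomaly request_path (check_content_anomaly request_path)

-- ===== LEMMAS AND PROOFS =====

theorem pvLoopA_iff (low : String) (L : List String) :
    pvLoopA low L = true ↔ ∃ sig ∈ L, PySem.Str.isIn sig low = true := by
  induction L with
  | nil => simp [pvLoopA]
  | cons sig rest ih =>
      simp only [pvLoopA]
      split_ifs with h
      · exact iff_of_true rfl ⟨sig, List.mem_cons_self, h⟩
      · rw [ih]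
        constructor
        · rintro ⟨t, ht, hh⟩; exact ⟨t, List.mem_cons_of_mem _ ht, hh⟩
        · rintro ⟨t, ht, hh⟩
          rcases List.mem_cons.1 ht with rfl | ht
          · exact absurd hh h
          · exact ⟨t, ht, hh⟩

theorem pvAtB_iff (low : List Char) (i : Nat) (L : List String) :
    pvAtB low i L = true ↔ ∃ sig ∈ L, PySem.Chars.startswith (low.drop i) sig.toList = true := by
  induction L with
  | nil => simp [pvAtB]
  | cons sig rest ih =>
      simp only [pvAtB]
      split_ifs with h
      · exact iff_of_true rfl ⟨sig, List.mem_cons_self, h⟩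
      · rw [ih]
        constructor
        · rintro ⟨t, ht, hh⟩; exact ⟨t, List.mem_cons_of_mem _ ht, hh⟩
        · rintro ⟨t, ht, hh⟩
          rcases List.mem_cons.1 ht with rfl | ht
          · exact absurd hh h
          · exact ⟨t, ht, hh⟩

theorem pvScanB_iff (low : List Char) (is : List Nat) :
    pvScanB low is = true ↔ ∃ i ∈ is, pvAtB low i pvSigs = true := by
  induction is with
  | nil => simp [pvScanB]
  | cons i rest ih =>
      simp only [pvScanB]
      split_ifs with h <;> simp [h, ih]

-- substring test ↔ some position ≤ length where the signature is a prefix of the suffix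
theorem isIn_iff_exists_le (sub s : List Char) :
    PySem.Chars.isIn sub s = true ↔ ∃ j, j ≤ s.length ∧ sub <+: s.drop j := by
  rw [← PySem.Chars.exists_prefix_drop_iff_isIn]
  constructor
  · rintro ⟨j, hj⟩
    by_cases h : j ≤ s.length
    · exact ⟨j, h, hj⟩
    · refine ⟨s.length, le_rfl, ?_⟩
      rw [List.drop_length]
      rwa [List.drop_eq_nil_of_le (by omega)] at hj
  · rintro ⟨j, _, hj⟩; exact ⟨j, hj⟩

theorem check_content_anomaly_eq (request_path : String) :
    check_content_anomaly request_path = check_content_anomaly_alt request_path := by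
  rw [Bool.eq_iff_iff]
  unfold check_content_anomaly check_content_anomaly_alt
  simp only [PySem.Str.toList_lower]
  rw [pvLoopA_iff, pvScanB_iff]
  constructor
  · rintro ⟨sig, hmem, hin⟩
    rw [PySem.Str.isIn_eq, PySem.Str.toList_lower, isIn_iff_exists_le] at hin
    obtain ⟨j, hle, hpre⟩ := hin
    refine ⟨j, by simp [List.mem_range]; omega, ?_⟩
    rw [pvAtB_iff]
    exact ⟨sig, hmem, (PySem.Chars.startswith_iff _ _).2 hpre⟩
  · rintro ⟨i, hi, hat⟩
    rw [pvAtB_iff] at hat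
    obtain ⟨sig, hmem, hsw⟩ := hat
    refine ⟨sig, hmem, ?_⟩
    rw [PySem.Str.isIn_eq, PySem.Str.toList_lower, isIn_iff_exists_le]
    simp only [List.mem_range] at hi
    exact ⟨min i _, by omega, by
      rcases Nat.le_total i ((PySem.Chars.lower request_path.toList).length) with h | h
      · rw [Nat.min_eq_left h]; exact (PySem.Chars.startswith_iff _ _).1 hsw
      · rw [Nat.min_eq_right h, List.drop_length]
        rw [List.drop_eq_nil_of_le h] at hsw
        exact (PySem.Chars.startswith_iff _ _).1 hsw⟩
  
-- ===== VERDICT (by name: the statement is the Claim_ definition above) =====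
theorem check_content_anomaly_spec : Claim_equal_check_content_anomaly := by
  intro rp _
  unfold Spec_check_content_anomaly
  exact check_content_anomaly_eq rp
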